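-- pv_equiv track=rewrite | github.com/deb007/travelbuddy | app/services/reset_utils.py | _should_preserve
-- ===== SOURCE A (Python) =====
-- from typing import Iterable, Optional
--
-- PRESERVE_META_PREFIXES: Iterable[str] = (
--     "budget_warn_pct",
--     "budget_danger_pct",
--     "forex_low_pct",
--     "exchange_rate_provider_override",
--     "rates_cache_ttl",
--     "budget_enforce_cap",
--     "budget_auto_create",
--     "default_budget_amounts",
--     "ui_theme",
--     "ui_show_day_totals",
--     "ui_expense_layout",
--     "widget_show_",  # prefix
-- )
--
-- def _should_preserve(key: str) -> bool:
--     for p in PRESERVE_META_PREFIXES: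
--         if p.endswith("_"):
--             if key.startswith(p):
--                 return True
--         elif key == p:
--             return True
--     return False
-- ===== SOURCE B (Python) =====
-- from typing import Iterable
--
-- PRESERVE_META_PREFIXES: Iterable[str] = (
--     "budget_warn_pct",
--     "budget_danger_pct",
--     "forex_low_pct",
--     "exchange_rate_provider_override",
--     "rates_cache_ttl",
--     "budget_enforce_cap",
--     "budget_auto_create",
--     "default_budget_amounts",
--     "ui_theme",
--     "ui_show_day_totals",
--     "ui_expense_layout",
--     "widget_show_",  # prefix
-- )
--
-- _PATTERNS = frozenset(PRESERVE_META_PREFIXES)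
-- _MAXLEN = max(map(len, PRESERVE_META_PREFIXES))
--
-- def _should_preserve(key: str) -> bool:
--     # Scan the PREFIXES OF KEY instead of the pattern list: key is preserved
--     # iff some prefix q of key is a pattern, and q is either the whole key
--     # (exact match) or a '_'-terminated pattern (prefix match).  Prefixes
--     # longer than the longest pattern cannot match, so stop there.
--     n = len(key)
--     for i in range(min(n, _MAXLEN) + 1):
--         q = key[:i]
--         if q in _PATTERNS and (i == n or q.endswith("_")):
--             return True
--     return False
-- ===== Notes on version B (the rewrite author's own statement) =====
-- stated objective: alternative
-- what changed: B inverts the traversal: instead of looping over the pattern list and branching per entry, it scans the prefixes of the key itself (key[:i] for i up to min(len(key), longest pattern)) and tests each against one frozenset of all patterns, accepting when the prefix is the whole key or ends in '_'.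
import Mathlib
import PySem

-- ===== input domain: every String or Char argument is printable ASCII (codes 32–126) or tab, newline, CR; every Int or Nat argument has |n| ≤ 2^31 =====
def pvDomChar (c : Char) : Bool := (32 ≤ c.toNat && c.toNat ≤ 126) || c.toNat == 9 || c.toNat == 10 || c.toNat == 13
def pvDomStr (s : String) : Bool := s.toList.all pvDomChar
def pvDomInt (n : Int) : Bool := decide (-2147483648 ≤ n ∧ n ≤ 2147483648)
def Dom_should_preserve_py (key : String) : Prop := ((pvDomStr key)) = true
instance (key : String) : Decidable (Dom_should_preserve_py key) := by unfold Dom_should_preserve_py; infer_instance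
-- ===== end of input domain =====

-- B scans the prefixes of key against one pattern set instead of scanning the pattern
-- list against key; objective: alternative (different traversal, same observable result).

-- ===== PORT A =====
def pvPreserveMetaPrefixes : List String :=
  ["budget_warn_pct", "budget_danger_pct", "forex_low_pct",
   "exchange_rate_provider_override", "rates_cache_ttl", "budget_enforce_cap",
   "budget_auto_create", "default_budget_amounts", "ui_theme",
   "ui_show_day_totals", "ui_expense_layout", "widget_show_"]

-- the 'for p in …: if … return True' loop, early return = stop recursing
def pvALoop (key : String) : List String → Bool
  | [] => false
  | p :: ps =>
    if PySem.Str.endswith p "_" then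
      if PySem.Str.startswith key p then true else pvALoop key ps
    else if key == p then true else pvALoop key ps

def should_preserve_py (key : String) : Bool := pvALoop key pvPreserveMetaPrefixes

-- ===== PORT B =====
-- _PATTERNS = frozenset(PRESERVE_META_PREFIXES)
def pvPatterns : PySem.Set String := PySem.Set.ofList pvPreserveMetaPrefixes

-- _MAXLEN = max(map(len, PRESERVE_META_PREFIXES))  (.getD 0 only unwraps max?'s Option; the list is a nonempty literal, so Python's max cannot raise)
def pvMaxLen : Int := (PySem.List.max? (pvPreserveMetaPrefixes.map PySem.Str.len) (fun x => x)).getD 0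

-- 'for i in range(min(n, _MAXLEN) + 1): q = key[:i]; if q in _PATTERNS and (i == n or q.endswith("_")): return True'
def should_preserve_py_alt (key : String) : Bool :=
  let n := PySem.Str.len key
  (PySem.List.pyRange 0 (min n pvMaxLen + 1) 1).any fun i =>
    let q := PySem.Str.slice key none (some i)
    pvPatterns.contains q && (i == n || PySem.Str.endswith q "_")

-- ===== PRECONDITION & SPEC =====
def Spec_should_preserve_py (key : String) (out : Bool) : Prop := out = should_preserve_py_alt key
instance (key : String) (out : Bool) : Decidable (Spec_should_preserve_py key out) := by unfold Spec_should_preserve_py; infer_instance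

-- ===== CLAIM (what is proved, stated in full; the proofs are below) =====
def Claim_equal_should_preserve_py : Prop := ∀ (key : String), Dom_should_preserve_py key → Spec_should_preserve_py key (should_preserve_py key)

-- ===== LEMMAS AND PROOFS =====

-- the 11 exact names (used only by the proofs)
def pvExactStrs : List String :=
  ["budget_warn_pct", "budget_danger_pct", "forex_low_pct",
   "exchange_rate_provider_override", "rates_cache_ttl", "budget_enforce_cap",
   "budget_auto_create", "default_budget_amounts", "ui_theme",
   "ui_show_day_totals", "ui_expense_layout"]

lemma pv_ite_or (p : Prop) [Decidable p] (b : Bool) :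
    (if p then true else b) = (decide p || b) := by
  by_cases h : p <;> simp [h]

-- characterisation of A's loop
lemma pvA_iff (key : String) :
    should_preserve_py key = true ↔
      key ∈ pvExactStrs ∨ "widget_show_".toList <+: key.toList := by
  have h0 : PySem.Chars.endswith "budget_warn_pct".toList "_".toList = false := by decide
  have h1 : PySem.Chars.endswith "budget_danger_pct".toList "_".toList = false := by decide
  have h2 : PySem.Chars.endswith "forex_low_pct".toList "_".toList = false := by decide
  have h3 : PySem.Chars.endswith "exchange_rate_provider_override".toList "_".toList = false := by decide
  have h4 : PySem.Chars.endswith "rates_cache_ttl".toList "_".toList = false := by decide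
  have h5 : PySem.Chars.endswith "budget_enforce_cap".toList "_".toList = false := by decide
  have h6 : PySem.Chars.endswith "budget_auto_create".toList "_".toList = false := by decide
  have h7 : PySem.Chars.endswith "default_budget_amounts".toList "_".toList = false := by decide
  have h8 : PySem.Chars.endswith "ui_theme".toList "_".toList = false := by decide
  have h9 : PySem.Chars.endswith "ui_show_day_totals".toList "_".toList = false := by decide
  have h10 : PySem.Chars.endswith "ui_expense_layout".toList "_".toList = false := by decide
  have h11 : PySem.Chars.endswith "widget_show_".toList "_".toList = true := by decide
  simp only [should_preserve_py, pvPreserveMetaPrefixes, pvALoop,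
             PySem.Str.endswith, h0, h1, h2, h3, h4, h5, h6, h7, h8, h9, h10, h11,
             Bool.false_eq_true, if_false, if_true]
  simp only [pv_ite_or, Bool.or_eq_true, decide_eq_true_eq, beq_iff_eq,
             PySem.Str.startswith_eq, PySem.Chars.startswith_iff,
             pvExactStrs, List.mem_cons, List.not_mem_nil, or_false]
  tauto

-- characterisation of B
lemma pvB_iff (key : String) :
    should_preserve_py_alt key = true ↔
      ∃ i : Int, 0 ≤ i ∧ i < min (PySem.Str.len key) pvMaxLen + 1 ∧
        (PySem.Str.slice key none (some i)) ∈ pvPreserveMetaPrefixes ∧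
        (i = PySem.Str.len key ∨
          PySem.Str.endswith (PySem.Str.slice key none (some i)) "_" = true) := by
  simp only [should_preserve_py_alt, pvPatterns, List.any_eq_true,
             PySem.List.mem_pyRange_one, Bool.and_eq_true, Bool.or_eq_true, beq_iff_eq]
  constructor
  · rintro ⟨i, ⟨h0, h1⟩, hc, hrest⟩
    refine ⟨i, h0, h1, ?_, hrest⟩
    exact (PySem.Set.mem_ofList _ _).mp ((PySem.Set.contains_iff _ _).mp hc)
  · rintro ⟨i, h0, h1, hm, hrest⟩
    exact ⟨i, ⟨h0, h1⟩, (PySem.Set.contains_iff _ _).mpr ((PySem.Set.mem_ofList _ _).mpr hm), hrest⟩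

lemma pv_slice_toList (key : String) (i : Int) (h : 0 ≤ i) :
    (PySem.Str.slice key none (some i)).toList = key.toList.take i.toNat := by
  rw [PySem.Str.toList_slice, PySem.Chars.slice_eq_listSlice, PySem.List.slice_to _ h]

lemma pv_len_nonneg (key : String) : 0 ≤ PySem.Str.len key := by
  rw [PySem.Str.len_eq]; exact Int.natCast_nonneg _

lemma pv_slice_len (key : String) :
    PySem.Str.slice key none (some (PySem.Str.len key)) = key := by
  apply String.toList_inj.mp
  rw [pv_slice_toList _ _ (pv_len_nonneg key), PySem.Str.len_eq]
  simp

lemma pv_exact_maxlen (k : String) (h : k ∈ pvExactStrs) : PySem.Str.len k ≤ pvMaxLen := by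
  fin_cases h <;> decide

lemma pv_exact_sub (k : String) (h : k ∈ pvExactStrs) : k ∈ pvPreserveMetaPrefixes := by
  simp only [pvExactStrs, List.mem_cons, List.not_mem_nil, or_false] at h
  simp only [pvPreserveMetaPrefixes, List.mem_cons, List.not_mem_nil, or_false]
  tauto

-- ===== VERDICT (by name: the statement is the Claim_ definition above) =====
theorem should_preserve_py_spec : Claim_equal_should_preserve_py := by
  intro key _
  unfold Spec_should_preserve_py
  rw [eq_comm, Bool.eq_iff_iff, pvB_iff, pvA_iff]
  constructor
  · -- B ⇒ A
    rintro ⟨i, h0, h1, hm, hrest⟩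
    simp only [pvPreserveMetaPrefixes, List.mem_cons, List.not_mem_nil, or_false] at hm
    rcases hm with h|h|h|h|h|h|h|h|h|h|h|h
    all_goals first
      | (refine Or.inr ?_
         have hq : ("widget_show_".toList) = key.toList.take i.toNat := by
           rw [← pv_slice_toList key i h0, h]
         exact hq ▸ List.take_prefix _ _)
      | (rcases hrest with hi | he
         · subst hi
           rw [pv_slice_len] at h
           subst h
           exact Or.inl (by decide)
         · rw [h] at he
           exact absurd he (by decide))
  · -- A ⇒ B
    rintro (hk | hp)
    · have hle : PySem.Str.len key ≤ pvMaxLen := pv_exact_maxlen key hk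
      exact ⟨PySem.Str.len key, pv_len_nonneg key, by omega,
        by rw [pv_slice_len]; exact pv_exact_sub key hk, Or.inl rfl⟩
    · have hws : ("widget_show_".toList).length = 12 := by decide
      have hlen : 12 ≤ key.toList.length := by
        have h := hp.length_le; omega
      have hsl : PySem.Str.slice key none (some 12) = "widget_show_" := by
        apply String.toList_inj.mp
        rw [pv_slice_toList _ _ (by norm_num)]
        have h12 : ((12 : Int)).toNat = 12 := rfl
        rw [h12]
        have := List.prefix_iff_eq_take.mp hp
        rw [hws] at this
        exact this.symm
      have hM : pvMaxLen = 31 := by decide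
      refine ⟨12, by norm_num, ?_, ?_, Or.inr ?_⟩
      · rw [PySem.Str.len_eq, hM]; omega
      · rw [hsl]
        simp [pvPreserveMetaPrefixes]
      · rw [hsl]; decide
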